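-- pv_equiv track=rewrite | github.com/LogaNick/InverseDL | data_import/convert_data.py | multiply_list_with_previous_sublist
-- ===== SOURCE A (Python) =====
-- def multiply_list_with_previous_sublist(list_of_numbers):
--     """
--     Returns [1, l_0 , l_1 * l_0, ...]
--     """
--     multiplied_list = []
--     for idx in range(len(list_of_numbers)):
--         multiplied = 1
--         for j in range(idx):
--             multiplied = multiplied * list_of_numbers[j]
--         multiplied_list.append(multiplied)
--
--     return multiplied_list
-- ===== SOURCE B (Python) =====
-- def multiply_list_with_previous_sublist(list_of_numbers):
--     """
--     Returns [1, l_0, l_1 * l_0, ...] in one pass with a running product.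
--     """
--     multiplied_list = []
--     product = 1
--     for x in list_of_numbers:
--         multiplied_list.append(product)
--         product *= x
--     return multiplied_list
-- ===== Notes on version B (the rewrite author's own statement) =====
-- stated objective: faster
-- what changed: Replaces the nested loop (recomputing the prefix product from scratch at every index) with a single pass maintaining a running product.
import Mathlib
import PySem

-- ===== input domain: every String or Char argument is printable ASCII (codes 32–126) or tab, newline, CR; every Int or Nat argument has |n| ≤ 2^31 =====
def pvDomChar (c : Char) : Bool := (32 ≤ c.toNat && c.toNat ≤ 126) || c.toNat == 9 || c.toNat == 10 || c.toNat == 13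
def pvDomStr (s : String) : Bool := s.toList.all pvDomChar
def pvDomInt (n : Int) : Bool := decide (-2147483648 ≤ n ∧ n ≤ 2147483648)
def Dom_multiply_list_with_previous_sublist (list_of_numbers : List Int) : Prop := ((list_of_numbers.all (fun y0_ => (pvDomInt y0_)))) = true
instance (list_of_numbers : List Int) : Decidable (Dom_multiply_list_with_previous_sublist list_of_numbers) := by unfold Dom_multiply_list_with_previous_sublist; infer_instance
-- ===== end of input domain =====

-- B replaces A's O(n^2) nested loops with a single pass maintaining a running product.

-- ===== PORT A =====
-- outer loop over range(len); inner loop recomputes the product of l[0..idx-1]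
-- (the index j is always in range, so the 0-default of `[j]?.getD` is never taken)
def multiply_list_with_previous_sublist (list_of_numbers : List Int) : List Int :=
  (List.range list_of_numbers.length).foldl
    (fun multiplied_list idx =>
      multiplied_list ++
        [(List.range idx).foldl (fun multiplied j => multiplied * (list_of_numbers[j]?.getD 0)) 1])
    []

-- ===== PORT B =====
-- one pass: state (multiplied_list, product); append product, then multiply it by x
def multiply_list_with_previous_sublist_alt (list_of_numbers : List Int) : List Int :=
  (list_of_numbers.foldl
    (fun (st : List Int × Int) x => (st.1 ++ [st.2], st.2 * x))
    ([], 1)).1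

-- ===== PRECONDITION & SPEC =====
def Spec_multiply_list_with_previous_sublist (list_of_numbers : List Int) (out : List Int) : Prop := out = multiply_list_with_previous_sublist_alt list_of_numbers
instance (list_of_numbers : List Int) (out : List Int) : Decidable (Spec_multiply_list_with_previous_sublist list_of_numbers out) := by unfold Spec_multiply_list_with_previous_sublist; infer_instance

-- ===== CLAIM (what is proved, stated in full; the proofs are below) =====
def Claim_equal_multiply_list_with_previous_sublist : Prop := ∀ (list_of_numbers : List Int), Dom_multiply_list_with_previous_sublist list_of_numbers → Spec_multiply_list_with_previous_sublist list_of_numbers (multiply_list_with_previous_sublist list_of_numbers)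

-- ===== LEMMAS AND PROOFS =====

-- A's inner loop computes the prefix product
theorem pvInnerA (l : List Int) (idx : ℕ) (h : idx ≤ l.length) :
    (List.range idx).foldl (fun m j => m * (l[j]?.getD 0)) 1 = (l.take idx).prod := by
  induction idx with
  | zero => simp
  | succ n ih =>
    have hn : n < l.length := h
    rw [List.range_succ, List.foldl_append, ih (Nat.le_of_lt hn),
        List.prod_take_succ l n hn]
    simp [List.getElem?_eq_getElem hn]

-- A's outer append-fold is a map
theorem pvFoldAppend (f : ℕ → Int) (ns : List ℕ) (acc : List Int) :
    ns.foldl (fun a i => a ++ [f i]) acc = acc ++ ns.map f := by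
  induction ns generalizing acc with
  | nil => simp
  | cons x xs ih => simp [List.foldl_cons, ih, List.append_assoc]

theorem pvA_eq_map (l : List Int) :
    multiply_list_with_previous_sublist l
      = (List.range l.length).map (fun i => (l.take i).prod) := by
  unfold multiply_list_with_previous_sublist
  rw [pvFoldAppend]
  simp only [List.nil_append]
  exact List.map_congr_left (fun i hi => pvInnerA l i (Nat.le_of_lt (List.mem_range.mp hi)))

-- B's one-pass fold invariant
theorem pvB_inv (l : List Int) (out : List Int) (p : Int) :
    (l.foldl (fun (st : List Int × Int) x => (st.1 ++ [st.2], st.2 * x)) (out, p)).1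
      = out ++ (List.range l.length).map (fun i => p * (l.take i).prod) := by
  induction l generalizing out p with
  | nil => simp
  | cons x xs ih =>
    rw [List.foldl_cons, ih]
    simp only [List.length_cons, List.range_succ_eq_map, List.map_cons, List.map_map]
    simp [List.append_assoc, Function.comp, mul_assoc]

theorem pvB_eq_map (l : List Int) :
    multiply_list_with_previous_sublist_alt l
      = (List.range l.length).map (fun i => (l.take i).prod) := by
  unfold multiply_list_with_previous_sublist_alt
  rw [pvB_inv]
  simp

-- ===== VERDICT (by name: the statement is the Claim_ definition above) =====
theorem multiply_list_with_previous_sublist_spec : Claim_equal_multiply_list_with_previous_sublist := by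
  intro l _
  unfold Spec_multiply_list_with_previous_sublist
  rw [pvA_eq_map, pvB_eq_map]
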